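-- pv_equiv track=rewrite | github.com/zuggernautt/90-DaysOfDSA | 90-DaysOfDSA/basics/can_be_find.py | can_find
-- ===== SOURCE A (Python) =====
-- def can_find(str1, str2):
--     count= {}
--     for char in str1:
--         count[char] = count.get(char, 0)+1
--
--     for char in str2:
--         if char not in count or count[char] == 0:
--             return False
--         count[char]-=1
--
--     return True
-- ===== SOURCE B (Python) =====
-- def can_find(str1, str2):
--     s1 = sorted(str1)
--     s2 = sorted(str2)
--     i = 0
--     j = 0
--     while i < len(s1) and j < len(s2):
--         if s1[i] == s2[j]:
--             i += 1
--             j += 1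
--         elif s1[i] < s2[j]:
--             i += 1
--         else:
--             return False
--     return j == len(s2)
-- ===== Notes on version B (the rewrite author's own statement) =====
-- stated objective: alternative
-- what changed: A makes a hash-table counting pass over str1 then a decrement-with-early-exit pass over str2; B sorts both strings and checks with a two-pointer merge scan that sorted(str2) is a subsequence of sorted(str1) (sub-multiset iff sorted-subsequence).
import Mathlib
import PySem

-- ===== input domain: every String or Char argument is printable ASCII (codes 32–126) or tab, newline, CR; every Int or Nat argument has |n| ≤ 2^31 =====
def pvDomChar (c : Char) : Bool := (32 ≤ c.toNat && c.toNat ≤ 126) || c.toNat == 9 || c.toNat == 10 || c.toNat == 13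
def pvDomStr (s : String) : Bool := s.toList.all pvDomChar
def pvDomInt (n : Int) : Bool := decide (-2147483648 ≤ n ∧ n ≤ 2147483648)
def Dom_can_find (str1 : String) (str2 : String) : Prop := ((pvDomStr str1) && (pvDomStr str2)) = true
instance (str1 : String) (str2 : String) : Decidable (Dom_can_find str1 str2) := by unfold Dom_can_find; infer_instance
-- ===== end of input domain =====

-- B sorts both strings and does a two-pointer merge scan (sorted-subsequence test),
-- replacing A's hash-table decrement pass; different algorithm (sort-then-scan vs counting).


-- ===== PORT A =====
-- A's second loop: return False on a missing/exhausted char, else decrement and continue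
def canFindGo (d : PySem.Dict Char Int) : List Char → Bool
  | [] => true
  | c :: rest =>
    if !(d.contains c) || d.getD c 0 == 0 then false
    else canFindGo (d.insert c (d.getD c 0 - 1)) rest

def can_find (str1 : String) (str2 : String) : Bool :=
  canFindGo (str1.toList.foldl (fun d c => d.insert c (d.getD c 0 + 1)) PySem.Dict.empty)
    str2.toList

-- ===== PORT B =====
-- B's while loop: two-pointer merge scan over the two sorted character lists
def mergeGo : List Char → List Char → Bool
  | _, [] => true
  | [], _ :: _ => false
  | a :: l1, b :: l2 =>
    if a = b then mergeGo l1 l2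
    else if a < b then mergeGo l1 (b :: l2)
    else false

def can_find_alt (str1 : String) (str2 : String) : Bool :=
  mergeGo (PySem.List.sorted str1.toList (fun c => c) false)
          (PySem.List.sorted str2.toList (fun c => c) false)

-- ===== PRECONDITION & SPEC =====
def Spec_can_find (str1 : String) (str2 : String) (out : Bool) : Prop := out = can_find_alt str1 str2
instance (str1 : String) (str2 : String) (out : Bool) : Decidable (Spec_can_find str1 str2 out) := by unfold Spec_can_find; infer_instance

-- ===== CLAIM (what is proved, stated in full; the proofs are below) =====
def Claim_equal_can_find : Prop := ∀ (str1 : String) (str2 : String), Dom_can_find str1 str2 → Spec_can_find str1 str2 (can_find str1 str2)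

-- ===== LEMMAS AND PROOFS =====

-- A's decrement loop succeeds iff every char's multiplicity in the remaining list fits the table
lemma canFindGo_iff (cs : List Char) (d : PySem.Dict Char Int)
    (hnn : ∀ k, 0 ≤ d.getD k 0) :
    canFindGo d cs = true ↔ ∀ c ∈ cs, (cs.count c : Int) ≤ d.getD c 0 := by
  induction cs generalizing d with
  | nil => simp [canFindGo]
  | cons c rest ih =>
    have hself : ((c :: rest).count c : Int) = (rest.count c : Int) + 1 := by
      simp
    have hother : ∀ k, k ≠ c → ((c :: rest).count k : Int) = (rest.count k : Int) := by
      intro k hkc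
      have hck : ¬c = k := fun h => hkc h.symm
      simp [hck]
    by_cases hz : d.getD c 0 = 0
    · have hcond : (!(d.contains c) || d.getD c 0 == 0) = true := by simp [hz]
      simp only [canFindGo, hcond, if_true]
      constructor
      · intro h; cases h
      · intro h
        have := h c (by simp)
        omega
    · have hv1 : 1 ≤ d.getD c 0 := by have := hnn c; omega
      have hcont : d.contains c = true := by
        by_contra h
        exact hz (PySem.Dict.getD_of_not_contains d 0 (by simpa using h))
      have hcond : (!(d.contains c) || d.getD c 0 == 0) = false := by
        simp [hcont, hz]
      simp only [canFindGo, hcond, Bool.false_eq_true, if_false]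
      have hnn2 : ∀ k, 0 ≤ (d.insert c (d.getD c 0 - 1)).getD k 0 := by
        intro k
        rw [PySem.Dict.getD_insert]
        split_ifs with h
        · omega
        · exact hnn k
      rw [ih _ hnn2]
      constructor
      · intro h k hk
        by_cases hkc : k = c
        · subst hkc
          by_cases hm : k ∈ rest
          · have := h k hm
            rw [PySem.Dict.getD_insert, if_pos rfl] at this
            omega
          · have h0 : rest.count k = 0 := List.count_eq_zero.mpr hm
            rw [hself]
            omega
        · have hkr : k ∈ rest := by
            rcases List.mem_cons.mp hk with h' | h'
            · exact absurd h' hkc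
            · exact h'
          have := h k hkr
          rw [PySem.Dict.getD_insert, if_neg hkc] at this
          rw [hother k hkc]
          omega
      · intro h k hk
        rw [PySem.Dict.getD_insert]
        by_cases hkc : k = c
        · subst hkc
          have := h k (by simp)
          rw [hself] at this
          rw [if_pos rfl]
          omega
        · have := h k (List.mem_cons.mpr (Or.inr hk))
          rw [hother k hkc] at this
          rw [if_neg hkc]
          omega

lemma counter_nonneg (l : List Char) (k : Char) : 0 ≤ (PySem.Dict.counter l).getD k 0 := by
  rw [PySem.Dict.getD_counter]
  exact_mod_cast Nat.zero_le _

-- B's merge scan implies the second list is a subsequence of the first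
lemma mergeGo_sublist (l1 l2 : List Char) (h : mergeGo l1 l2 = true) : List.Sublist l2 l1 := by
  induction l1 generalizing l2 with
  | nil =>
    cases l2 with
    | nil => exact List.Sublist.refl _
    | cons b l2 => simp [mergeGo] at h
  | cons a l1 ih =>
    cases l2 with
    | nil => exact List.nil_sublist _
    | cons b l2 =>
      by_cases hab : a = b
      · subst hab
        simp only [mergeGo, if_pos] at h
        exact List.Sublist.cons₂ a (ih l2 h)
      · by_cases hlt : a < b
        · simp only [mergeGo, if_neg hab, if_pos hlt] at h
          exact List.Sublist.cons a (ih (b :: l2) h)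
        · simp [mergeGo, hab, hlt] at h

-- and conversely, when the scanned (first) list is sorted
lemma sublist_mergeGo (l1 l2 : List Char) (hs : l1.Pairwise (· ≤ ·)) (h : List.Sublist l2 l1) :
    mergeGo l1 l2 = true := by
  induction l1 generalizing l2 with
  | nil =>
    cases l2 with
    | nil => rfl
    | cons b l2 => cases h
  | cons a l1 ih =>
    have hs' : l1.Pairwise (· ≤ ·) := hs.tail
    cases l2 with
    | nil => rfl
    | cons b l2 =>
      by_cases hab : a = b
      · subst hab
        simp only [mergeGo, if_pos]
        cases h with
        | cons _ h' => exact ih l2 hs' ((List.sublist_cons_self a l2).trans h')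
        | cons₂ _ h' => exact ih l2 hs' h'
      · by_cases hlt : a < b
        · simp only [mergeGo, if_neg hab, if_pos hlt]
          cases h with
          | cons _ h' => exact ih (b :: l2) hs' h'
          | cons₂ _ h' => exact absurd rfl hab
        · exfalso
          have hba : b < a := lt_of_le_of_ne (not_lt.mp hlt) (fun e => hab e.symm)
          have hmem : b ∈ a :: l1 := h.subset (by simp)
          rcases List.mem_cons.mp hmem with he | hm
          · exact hab he.symm
          · have : a ≤ b := (List.pairwise_cons.mp hs).1 b hm
            exact absurd hba (not_lt.mpr this)

lemma sorted_pairwise_le (l : List Char) :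
    (PySem.List.sorted l (fun c => c) false).Pairwise (· ≤ ·) := by
  have := PySem.List.sorted_pairwise (xs := l) (key := fun c => c)
  simpa using this

-- B's result characterised by counts
lemma can_find_alt_iff (l1 l2 : List Char) :
    mergeGo (PySem.List.sorted l1 (fun c => c) false)
            (PySem.List.sorted l2 (fun c => c) false) = true ↔
    ∀ c ∈ l2, l2.count c ≤ l1.count c := by
  have hp1 := (PySem.List.sorted_perm (xs := l1) (key := fun c => c) (rev := false))
  have hp2 := (PySem.List.sorted_perm (xs := l2) (key := fun c => c) (rev := false))
  constructor
  · intro h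
    have hsub : List.Subperm l2 l1 :=
      (hp2.symm.subperm).trans (((mergeGo_sublist _ _ h).subperm).trans hp1.subperm)
    intro c _
    exact List.subperm_ext_iff.mp hsub c (by assumption)
  · intro h
    have hsub : List.Subperm l2 l1 := List.subperm_ext_iff.mpr (fun c hc => h c hc)
    have hsub' : List.Subperm (PySem.List.sorted l2 (fun c => c) false) (PySem.List.sorted l1 (fun c => c) false) :=
      (hp2.subperm).trans (hsub.trans hp1.symm.subperm)
    exact sublist_mergeGo _ _ (sorted_pairwise_le l1)
      (List.sublist_of_subperm_of_pairwise hsub' (sorted_pairwise_le l2) (sorted_pairwise_le l1))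

-- ===== VERDICT (by name: the statement is the Claim_ definition above) =====
theorem can_find_spec : Claim_equal_can_find := by
  intro str1 str2 _
  unfold Spec_can_find can_find can_find_alt
  rw [PySem.Dict.foldl_insert_getD_add_one_eq_counter]
  have hA := canFindGo_iff str2.toList (PySem.Dict.counter str1.toList) (counter_nonneg str1.toList)
  have hB := can_find_alt_iff str1.toList str2.toList
  rw [Bool.eq_iff_iff, hA, hB]
  constructor
  · intro h c hc
    have := h c hc
    rw [PySem.Dict.getD_counter] at this
    exact_mod_cast this
  · intro h c hc
    rw [PySem.Dict.getD_counter]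
    exact_mod_cast h c hc
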